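-- pv_equiv track=rewrite | github.com/Floretion-Inquisitor/floretions | lib/triangleize_utils/centroid_distance.py | _accum_uvw_from_octal
-- ===== SOURCE A (Python) =====
-- from typing import Tuple, Literal
--
-- def _accum_uvw_from_octal(oct_str: str) -> Tuple[int, int, int]:
--     n = len(oct_str)
--     s = -1
--     U = V = W = 0
--     for t, ch in enumerate(oct_str, start=1):
--         if ch == '7':
--             s = -s
--         elif ch == '1':
--             U += s * (1 << (n - t))
--         elif ch == '2':
--             V += s * (1 << (n - t))
--         elif ch == '4':
--             W += s * (1 << (n - t))
--         else:
--             raise ValueError(f"Digit ottale non valido: {ch}")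
--     return U, V, W
-- ===== SOURCE B (Python) =====
-- from typing import Tuple
--
-- def _accum_uvw_from_octal(oct_str: str) -> Tuple[int, int, int]:
--     # Horner's method: no length or per-digit powers; double the partial sums each step.
--     s = -1
--     U = V = W = 0
--     for ch in oct_str:
--         U *= 2
--         V *= 2
--         W *= 2
--         if ch == '7':
--             s = -s
--         elif ch == '1':
--             U += s
--         elif ch == '2':
--             V += s
--         elif ch == '4':
--             W += s
--         else:
--             raise ValueError(f"Digit ottale non valido: {ch}")
--     return U, V, W
-- ===== Notes on version B (the rewrite author's own statement) =====
-- stated objective: alternative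
-- what changed: Replaces the precomputed-length, per-digit power 1<<(n-t) accumulation by Horner's method: the partial sums U,V,W are doubled at each step and the sign unit is added directly, so neither n nor any shift is computed.
import Mathlib
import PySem

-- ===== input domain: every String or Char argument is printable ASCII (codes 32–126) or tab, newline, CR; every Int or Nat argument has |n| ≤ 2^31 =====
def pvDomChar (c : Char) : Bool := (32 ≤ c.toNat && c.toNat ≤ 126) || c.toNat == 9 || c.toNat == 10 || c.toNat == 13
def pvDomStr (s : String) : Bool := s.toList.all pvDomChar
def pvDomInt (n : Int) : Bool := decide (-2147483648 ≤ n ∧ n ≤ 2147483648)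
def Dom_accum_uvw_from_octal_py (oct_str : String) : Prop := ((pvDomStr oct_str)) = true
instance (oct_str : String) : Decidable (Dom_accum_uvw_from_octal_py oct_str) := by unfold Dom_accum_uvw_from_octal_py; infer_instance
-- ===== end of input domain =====

-- B accumulates by Horner-style doubling instead of A's precomputed length and per-digit shifts (objective: alternative).

-- ===== PORT A =====
-- A's loop over enumerate(oct_str, start=1) with n = len(oct_str); on an invalid
-- digit Python raises ValueError — the port stops there (such inputs are outside Pre_).
def pvALoop (n : Nat) : List Char → Nat → Int → Int → Int → Int → Int × Int × Int
  | [], _, _, U, V, W => (U, V, W)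
  | c :: rest, t, s, U, V, W =>
    if c = '7' then pvALoop n rest (t+1) (-s) U V W
    else if c = '1' then pvALoop n rest (t+1) s (U + s * (2 ^ (n - t))) V W
    else if c = '2' then pvALoop n rest (t+1) s U (V + s * (2 ^ (n - t))) W
    else if c = '4' then pvALoop n rest (t+1) s U V (W + s * (2 ^ (n - t)))
    else (U, V, W)  -- raise ValueError(f"Digit ottale non valido: {ch}")

def accum_uvw_from_octal_py (oct_str : String) : Int × Int × Int :=
  pvALoop oct_str.toList.length oct_str.toList 1 (-1) 0 0 0

-- ===== PORT B =====
-- B's Horner loop: double the partial sums each step, then add the signed unit.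
def pvBLoop : List Char → Int → Int → Int → Int → Int × Int × Int
  | [], _, U, V, W => (U, V, W)
  | c :: rest, s, U, V, W =>
    let U' := 2 * U
    let V' := 2 * V
    let W' := 2 * W
    if c = '7' then pvBLoop rest (-s) U' V' W'
    else if c = '1' then pvBLoop rest s (U' + s) V' W'
    else if c = '2' then pvBLoop rest s U' (V' + s) W'
    else if c = '4' then pvBLoop rest s U' V' (W' + s)
    else (U', V', W')  -- raise ValueError(f"Digit ottale non valido: {ch}")

def accum_uvw_from_octal_py_alt (oct_str : String) : Int × Int × Int :=
  pvBLoop oct_str.toList (-1) 0 0 0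

-- ===== PRECONDITION & SPEC =====
-- Pre_ excludes exactly the inputs containing a character other than '1','2','4','7',
-- on which Python A raises ValueError (B raises there too).
def Pre_accum_uvw_from_octal_py (oct_str : String) : Prop :=
  oct_str.toList.all (fun c => c == '1' || c == '2' || c == '4' || c == '7') = true
instance (oct_str : String) : Decidable (Pre_accum_uvw_from_octal_py oct_str) := by
  unfold Pre_accum_uvw_from_octal_py; infer_instance

def pvWitness_accum_uvw_from_octal_py : String := "12477"

def Spec_accum_uvw_from_octal_py (oct_str : String) (out : Int × Int × Int) : Prop := out = accum_uvw_from_octal_py_alt oct_str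
instance (oct_str : String) (out : Int × Int × Int) : Decidable (Spec_accum_uvw_from_octal_py oct_str out) := by unfold Spec_accum_uvw_from_octal_py; infer_instance

-- ===== CLAIM (what is proved, stated in full; the proofs are below) =====
def Claim_equal_accum_uvw_from_octal_py : Prop := ∀ (oct_str : String), Dom_accum_uvw_from_octal_py oct_str → Pre_accum_uvw_from_octal_py oct_str → Spec_accum_uvw_from_octal_py oct_str (accum_uvw_from_octal_py oct_str)

-- ===== LEMMAS AND PROOFS =====

-- A's loop only depends on the difference n - t of its counters.
theorem pvALoop_shift (cs : List Char) : ∀ (n t : Nat) (s U V W : Int),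
    pvALoop (n+1) cs (t+1) s U V W = pvALoop n cs t s U V W := by
  induction cs with
  | nil => intro n t s U V W; rfl
  | cons c rest ih =>
    intro n t s U V W
    simp only [pvALoop, Nat.succ_sub_succ]
    split_ifs <;> first | rfl | exact ih ..

-- Horner invariant: B's loop from state (U,V,W) equals A's loop from the
-- states scaled by 2^|cs|, for lists of valid digits.
theorem pvBLoop_eq (cs : List Char) :
    (∀ c ∈ cs, c = '1' ∨ c = '2' ∨ c = '4' ∨ c = '7') →
    ∀ (s U V W : Int),
    pvBLoop cs s U V W
      = pvALoop cs.length cs 1 s (2 ^ cs.length * U) (2 ^ cs.length * V) (2 ^ cs.length * W) := by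
  induction cs with
  | nil => intro _ s U V W; simp [pvBLoop, pvALoop]
  | cons c rest ih =>
    intro h s U V W
    have hc := h c (List.mem_cons_self ..)
    have hrest : ∀ c ∈ rest, c = '1' ∨ c = '2' ∨ c = '4' ∨ c = '7' :=
      fun c hc => h c (List.mem_cons_of_mem _ hc)
    have hsh : ∀ s U V W : Int, pvALoop (rest.length + 1) rest (1 + 1) s U V W
        = pvALoop rest.length rest 1 s U V W := pvALoop_shift rest rest.length 1
    rcases hc with hc | hc | hc | hc <;>
      · subst hc
        simp only [pvBLoop, pvALoop, List.length_cons, Nat.add_sub_cancel, Char.reduceEq, if_true, if_false]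
        rw [hsh, ih hrest]
        ring_nf

-- ===== VERDICT (by name: the statement is the Claim_ definition above) =====
theorem accum_uvw_from_octal_py_spec : Claim_equal_accum_uvw_from_octal_py := by
  intro oct_str _ hpre
  have hpre' : ∀ c ∈ oct_str.toList, c = '1' ∨ c = '2' ∨ c = '4' ∨ c = '7' := by
    intro c hc
    have := List.all_eq_true.mp hpre c hc
    simp only [Bool.or_eq_true, beq_iff_eq] at this
    tauto
  unfold Spec_accum_uvw_from_octal_py accum_uvw_from_octal_py accum_uvw_from_octal_py_alt
  rw [pvBLoop_eq _ hpre']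
  simp
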